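-- pv_equiv track=rewrite | github.com/phemps/ai-assisted-workflows | shared/todo-planner/api/add_file.py | infer_function_purpose
-- ===== SOURCE A (Python) =====
-- def infer_function_purpose(name: str, description: str) -> str:
--     """Infer the semantic purpose of a function from its name and description."""
--     combined = f"{name} {description}".lower()
--
--     # Authentication purposes
--     if any(word in combined for word in ["signin", "login", "authenticate", "auth"]):
--         return "user_authentication"
--     elif any(word in combined for word in ["signup", "register", "create_user"]):
--         return "user_registration"
--     elif any(word in combined for word in ["signout", "logout", "sign_out"]):
--         return "user_logout"
--     elif any(word in combined for word in ["verify", "confirm", "validate_email"]):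
--         return "email_verification"
--
--     # Scan purposes
--     elif (
--         any(word in combined for word in ["submit", "create", "start"])
--         and "scan" in combined
--     ):
--         return "scan_submission"
--     elif any(word in combined for word in ["get", "fetch", "retrieve"]) and any(
--         w in combined for w in ["scan", "result", "report"]
--     ):
--         return "scan_retrieval"
--     elif (
--         any(word in combined for word in ["check", "validate"]) and "quota" in combined
--     ):
--         return "quota_checking"
--     elif "status" in combined and "scan" in combined:
--         return "scan_status_check"
--
--     # Report purposes
--     elif (
--         any(word in combined for word in ["generate", "create", "build"])
--         and "report" in combined
--     ):
--         return "report_generation"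
--     elif any(word in combined for word in ["get", "fetch"]) and "report" in combined:
--         return "report_retrieval"
--
--     # Storage purposes
--     elif any(word in combined for word in ["upload", "store", "save"]) and any(
--         w in combined for w in ["file", "artifact", "asset"]
--     ):
--         return "file_storage"
--     elif any(word in combined for word in ["delete", "remove"]) and any(
--         w in combined for w in ["file", "artifact"]
--     ):
--         return "file_deletion"
--
--     # Scheduling purposes
--     elif any(word in combined for word in ["schedule", "queue"]) and "scan" in combined:
--         return "scan_scheduling"
--
--     # Generic CRUD operations
--     elif any(word in combined for word in ["create", "insert", "add"]):
--         return "data_creation"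
--     elif any(word in combined for word in ["update", "modify", "edit"]):
--         return "data_update"
--     elif any(word in combined for word in ["delete", "remove", "destroy"]):
--         return "data_deletion"
--     elif any(word in combined for word in ["get", "fetch", "retrieve", "find"]):
--         return "data_retrieval"
--     elif any(word in combined for word in ["list", "all", "many"]):
--         return "data_listing"
--
--     return f"unknown_{name.lower()}"
-- ===== SOURCE B (Python) =====
-- # Single left-to-right scan (with a first-character index of the keywords) collecting
-- # ALL keywords present as a set; the priority decision then reads set membership
-- # instead of searching the string.
-- _KEYWORDS = [
--     "signin", "login", "authenticate", "auth",
--     "signup", "register", "create_user",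
--     "signout", "logout", "sign_out",
--     "verify", "confirm", "validate_email",
--     "submit", "create", "start", "scan",
--     "get", "fetch", "retrieve", "result", "report",
--     "check", "validate", "quota", "status",
--     "generate", "build",
--     "upload", "store", "save", "file", "artifact", "asset",
--     "delete", "remove",
--     "schedule", "queue",
--     "insert", "add", "update", "modify", "edit", "destroy",
--     "find", "list", "all", "many",
-- ]
--
--
-- _BY_FIRST = {}
-- for _w in _KEYWORDS:
--     _BY_FIRST.setdefault(_w[0], []).append(_w)
--
--
-- def infer_function_purpose(name: str, description: str) -> str:
--     combined = (name + " " + description).lower()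
--     found = set()
--     for i, c in enumerate(combined):
--         for w in _BY_FIRST.get(c, ()):
--             if combined.startswith(w, i):
--                 found.add(w)
--
--     if "signin" in found or "login" in found or "authenticate" in found or "auth" in found:
--         return "user_authentication"
--     elif "signup" in found or "register" in found or "create_user" in found:
--         return "user_registration"
--     elif "signout" in found or "logout" in found or "sign_out" in found:
--         return "user_logout"
--     elif "verify" in found or "confirm" in found or "validate_email" in found:
--         return "email_verification"
--     elif ("submit" in found or "create" in found or "start" in found) and "scan" in found:
--         return "scan_submission"
--     elif ("get" in found or "fetch" in found or "retrieve" in found) and (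
--         "scan" in found or "result" in found or "report" in found
--     ):
--         return "scan_retrieval"
--     elif ("check" in found or "validate" in found) and "quota" in found:
--         return "quota_checking"
--     elif "status" in found and "scan" in found:
--         return "scan_status_check"
--     elif ("generate" in found or "create" in found or "build" in found) and "report" in found:
--         return "report_generation"
--     elif ("get" in found or "fetch" in found) and "report" in found:
--         return "report_retrieval"
--     elif ("upload" in found or "store" in found or "save" in found) and (
--         "file" in found or "artifact" in found or "asset" in found
--     ):
--         return "file_storage"
--     elif ("delete" in found or "remove" in found) and ("file" in found or "artifact" in found):
--         return "file_deletion"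
--     elif ("schedule" in found or "queue" in found) and "scan" in found:
--         return "scan_scheduling"
--     elif "create" in found or "insert" in found or "add" in found:
--         return "data_creation"
--     elif "update" in found or "modify" in found or "edit" in found:
--         return "data_update"
--     elif "delete" in found or "remove" in found or "destroy" in found:
--         return "data_deletion"
--     elif "get" in found or "fetch" in found or "retrieve" in found or "find" in found:
--         return "data_retrieval"
--     elif "list" in found or "all" in found or "many" in found:
--         return "data_listing"
--     return "unknown_" + name.lower()
-- ===== Notes on version B (the rewrite author's own statement) =====
-- stated objective: alternative
-- what changed: Instead of A's ~40 independent lazy substring searches inside an if/elif chain, B builds a first-character index of the keywords and makes one left-to-right scan over the combined string that simultaneously collects the set of all keywords occurring in it; the priority decision then only tests set membership.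
import Mathlib
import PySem

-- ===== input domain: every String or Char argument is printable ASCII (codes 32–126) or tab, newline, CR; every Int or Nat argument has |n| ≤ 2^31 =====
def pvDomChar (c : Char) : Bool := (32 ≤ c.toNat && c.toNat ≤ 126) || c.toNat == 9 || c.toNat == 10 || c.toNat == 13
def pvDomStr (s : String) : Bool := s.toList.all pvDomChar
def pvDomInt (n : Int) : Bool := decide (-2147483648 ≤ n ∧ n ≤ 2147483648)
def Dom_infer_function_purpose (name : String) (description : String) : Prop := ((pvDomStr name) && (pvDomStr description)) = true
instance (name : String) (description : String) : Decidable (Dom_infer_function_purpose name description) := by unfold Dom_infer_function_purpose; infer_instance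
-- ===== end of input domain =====

-- B replaces A's per-branch substring searches by ONE left-to-right scan of the string
-- collecting the set of all keywords present, then a set-membership decision (alternative, same cost).

-- ===== PORT A =====
def infer_function_purpose (name : String) (description : String) : String :=
  let combined := PySem.Str.lower (name ++ " " ++ description)
  if PySem.Str.isIn "signin" combined || PySem.Str.isIn "login" combined || PySem.Str.isIn "authenticate" combined || PySem.Str.isIn "auth" combined then
    "user_authentication"
  else if PySem.Str.isIn "signup" combined || PySem.Str.isIn "register" combined || PySem.Str.isIn "create_user" combined then
    "user_registration"
  else if PySem.Str.isIn "signout" combined || PySem.Str.isIn "logout" combined || PySem.Str.isIn "sign_out" combined then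
    "user_logout"
  else if PySem.Str.isIn "verify" combined || PySem.Str.isIn "confirm" combined || PySem.Str.isIn "validate_email" combined then
    "email_verification"
  else if (PySem.Str.isIn "submit" combined || PySem.Str.isIn "create" combined || PySem.Str.isIn "start" combined) && PySem.Str.isIn "scan" combined then
    "scan_submission"
  else if (PySem.Str.isIn "get" combined || PySem.Str.isIn "fetch" combined || PySem.Str.isIn "retrieve" combined) && (PySem.Str.isIn "scan" combined || PySem.Str.isIn "result" combined || PySem.Str.isIn "report" combined) then
    "scan_retrieval"
  else if (PySem.Str.isIn "check" combined || PySem.Str.isIn "validate" combined) && PySem.Str.isIn "quota" combined then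
    "quota_checking"
  else if PySem.Str.isIn "status" combined && PySem.Str.isIn "scan" combined then
    "scan_status_check"
  else if (PySem.Str.isIn "generate" combined || PySem.Str.isIn "create" combined || PySem.Str.isIn "build" combined) && PySem.Str.isIn "report" combined then
    "report_generation"
  else if (PySem.Str.isIn "get" combined || PySem.Str.isIn "fetch" combined) && PySem.Str.isIn "report" combined then
    "report_retrieval"
  else if (PySem.Str.isIn "upload" combined || PySem.Str.isIn "store" combined || PySem.Str.isIn "save" combined) && (PySem.Str.isIn "file" combined || PySem.Str.isIn "artifact" combined || PySem.Str.isIn "asset" combined) then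
    "file_storage"
  else if (PySem.Str.isIn "delete" combined || PySem.Str.isIn "remove" combined) && (PySem.Str.isIn "file" combined || PySem.Str.isIn "artifact" combined) then
    "file_deletion"
  else if (PySem.Str.isIn "schedule" combined || PySem.Str.isIn "queue" combined) && PySem.Str.isIn "scan" combined then
    "scan_scheduling"
  else if PySem.Str.isIn "create" combined || PySem.Str.isIn "insert" combined || PySem.Str.isIn "add" combined then
    "data_creation"
  else if PySem.Str.isIn "update" combined || PySem.Str.isIn "modify" combined || PySem.Str.isIn "edit" combined then
    "data_update"
  else if PySem.Str.isIn "delete" combined || PySem.Str.isIn "remove" combined || PySem.Str.isIn "destroy" combined then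
    "data_deletion"
  else if PySem.Str.isIn "get" combined || PySem.Str.isIn "fetch" combined || PySem.Str.isIn "retrieve" combined || PySem.Str.isIn "find" combined then
    "data_retrieval"
  else if PySem.Str.isIn "list" combined || PySem.Str.isIn "all" combined || PySem.Str.isIn "many" combined then
    "data_listing"
  else
    "unknown_" ++ PySem.Str.lower name

-- ===== PORT B =====
def pvKeywords : List String :=
  [ "signin", "login", "authenticate", "auth",
    "signup", "register", "create_user",
    "signout", "logout", "sign_out",
    "verify", "confirm", "validate_email",
    "submit", "create", "start", "scan",
    "get", "fetch", "retrieve", "result", "report",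
    "check", "validate", "quota", "status",
    "generate", "build",
    "upload", "store", "save", "file", "artifact", "asset",
    "delete", "remove",
    "schedule", "queue",
    "insert", "add", "update", "modify", "edit", "destroy",
    "find", "list", "all", "many" ]

-- Source B's module-level first-character index: _BY_FIRST.setdefault(w[0], []).append(w)
-- (w[0] ported as headD: every keyword is a nonempty literal, so the default is never used)
def pvByFirst : PySem.Dict Char (List String) :=
  pvKeywords.foldl
    (fun d w => d.insert (w.toList.headD ' ') (d.getD (w.toList.headD ' ') [] ++ [w])) ⟨[]⟩

-- Source B's scan loop: 'for i, c in enumerate(combined): for w in _BY_FIRST.get(c, ()): if combined.startswith(w, i)';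
-- recursion on the tail combined[i:], on which combined.startswith(w, i) is startswith
def pvScan (tail : List Char) (found : PySem.Set String) : PySem.Set String :=
  match tail with
  | [] => found
  | c :: t =>
    let found' := (pvByFirst.getD c []).foldl
      (fun f w => if PySem.Chars.startswith (c :: t) w.toList then PySem.Set.add f w else f) found
    pvScan t found'

def infer_function_purpose_alt (name : String) (description : String) : String :=
  let combined := PySem.Str.lower (name ++ " " ++ description)
  let found := pvScan combined.toList PySem.Set.empty
  if PySem.Set.contains found "signin" || PySem.Set.contains found "login" || PySem.Set.contains found "authenticate" || PySem.Set.contains found "auth" then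
    "user_authentication"
  else if PySem.Set.contains found "signup" || PySem.Set.contains found "register" || PySem.Set.contains found "create_user" then
    "user_registration"
  else if PySem.Set.contains found "signout" || PySem.Set.contains found "logout" || PySem.Set.contains found "sign_out" then
    "user_logout"
  else if PySem.Set.contains found "verify" || PySem.Set.contains found "confirm" || PySem.Set.contains found "validate_email" then
    "email_verification"
  else if (PySem.Set.contains found "submit" || PySem.Set.contains found "create" || PySem.Set.contains found "start") && PySem.Set.contains found "scan" then
    "scan_submission"
  else if (PySem.Set.contains found "get" || PySem.Set.contains found "fetch" || PySem.Set.contains found "retrieve") && (PySem.Set.contains found "scan" || PySem.Set.contains found "result" || PySem.Set.contains found "report") then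
    "scan_retrieval"
  else if (PySem.Set.contains found "check" || PySem.Set.contains found "validate") && PySem.Set.contains found "quota" then
    "quota_checking"
  else if PySem.Set.contains found "status" && PySem.Set.contains found "scan" then
    "scan_status_check"
  else if (PySem.Set.contains found "generate" || PySem.Set.contains found "create" || PySem.Set.contains found "build") && PySem.Set.contains found "report" then
    "report_generation"
  else if (PySem.Set.contains found "get" || PySem.Set.contains found "fetch") && PySem.Set.contains found "report" then
    "report_retrieval"
  else if (PySem.Set.contains found "upload" || PySem.Set.contains found "store" || PySem.Set.contains found "save") && (PySem.Set.contains found "file" || PySem.Set.contains found "artifact" || PySem.Set.contains found "asset") then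
    "file_storage"
  else if (PySem.Set.contains found "delete" || PySem.Set.contains found "remove") && (PySem.Set.contains found "file" || PySem.Set.contains found "artifact") then
    "file_deletion"
  else if (PySem.Set.contains found "schedule" || PySem.Set.contains found "queue") && PySem.Set.contains found "scan" then
    "scan_scheduling"
  else if PySem.Set.contains found "create" || PySem.Set.contains found "insert" || PySem.Set.contains found "add" then
    "data_creation"
  else if PySem.Set.contains found "update" || PySem.Set.contains found "modify" || PySem.Set.contains found "edit" then
    "data_update"
  else if PySem.Set.contains found "delete" || PySem.Set.contains found "remove" || PySem.Set.contains found "destroy" then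
    "data_deletion"
  else if PySem.Set.contains found "get" || PySem.Set.contains found "fetch" || PySem.Set.contains found "retrieve" || PySem.Set.contains found "find" then
    "data_retrieval"
  else if PySem.Set.contains found "list" || PySem.Set.contains found "all" || PySem.Set.contains found "many" then
    "data_listing"
  else
    "unknown_" ++ PySem.Str.lower name

-- ===== PRECONDITION & SPEC =====
def Spec_infer_function_purpose (name : String) (description : String) (out : String) : Prop := out = infer_function_purpose_alt name description
instance (name : String) (description : String) (out : String) : Decidable (Spec_infer_function_purpose name description out) := by unfold Spec_infer_function_purpose; infer_instance

-- ===== CLAIM (what is proved, stated in full; the proofs are below) =====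
def Claim_equal_infer_function_purpose : Prop := ∀ (name : String) (description : String), Dom_infer_function_purpose name description → Spec_infer_function_purpose name description (infer_function_purpose name description)

-- ===== LEMMAS AND PROOFS =====

-- every keyword is nonempty and is listed in its first-character bucket of the index
theorem pv_kw_ne : ∀ w ∈ pvKeywords, w.toList ≠ [] := by decide

set_option maxRecDepth 100000 in
theorem pv_kw_bucket : ∀ w ∈ pvKeywords, w ∈ pvByFirst.getD (w.toList.headD ' ') [] := by decide

-- the inner for-loop: w is in the updated set iff it was already there or is a bucket word starting the current tail
theorem pv_mem_foldl (tail : List Char) (ws : List String) (found : PySem.Set String) (w : String) :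
    w ∈ ws.foldl (fun f u => if PySem.Chars.startswith tail u.toList then PySem.Set.add f u else f) found ↔
    w ∈ found ∨ (w ∈ ws ∧ PySem.Chars.startswith tail w.toList = true) := by
  induction ws generalizing found with
  | nil => simp
  | cons u us ih =>
    simp only [List.foldl_cons, ih, List.mem_cons]
    by_cases h : PySem.Chars.startswith tail u.toList = true
    · simp only [h, if_pos]
      rw [PySem.Set.mem_add]
      constructor
      · rintro (⟨hf | he⟩ | ⟨hm, hs⟩)
        · exact Or.inl hf
        · exact Or.inr ⟨Or.inl he, he ▸ h⟩
        · exact Or.inr ⟨Or.inr hm, hs⟩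
      · rintro (hf | ⟨(he | hm), hs⟩)
        · exact Or.inl (Or.inl hf)
        · exact Or.inl (Or.inr he)
        · exact Or.inr ⟨hm, hs⟩
    · simp only [h, if_neg, Bool.not_eq_true]
      constructor
      · rintro (hf | ⟨hm, hs⟩)
        · exact Or.inl hf
        · exact Or.inr ⟨Or.inr hm, hs⟩
      · rintro (hf | ⟨(he | hm), hs⟩)
        · exact Or.inl hf
        · exact absurd hs (by rw [he]; simp [h])
        · exact Or.inr ⟨hm, hs⟩

-- the scan: a keyword is collected iff it was already there or occurs at some position of the tail
theorem pv_mem_scan (tail : List Char) (found : PySem.Set String) (w : String)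
    (hw : w ∈ pvKeywords) :
    w ∈ pvScan tail found ↔ w ∈ found ∨ ∃ j, w.toList <+: tail.drop j := by
  induction tail generalizing found with
  | nil =>
    rw [pvScan]
    constructor
    · exact Or.inl
    · rintro (hf | ⟨j, hp⟩)
      · exact hf
      · exact absurd (List.prefix_nil.mp (by simpa using hp)) (pv_kw_ne w hw)
  | cons c t ih =>
    rw [pvScan]
    simp only [ih, pv_mem_foldl]
    constructor
    · rintro ((hf | ⟨_, hs⟩) | ⟨j, hp⟩)
      · exact Or.inl hf
      · exact Or.inr ⟨0, by simpa using (PySem.Chars.startswith_iff _ _).mp hs⟩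
      · exact Or.inr ⟨j + 1, by simpa using hp⟩
    · rintro (hf | ⟨j, hp⟩)
      · exact Or.inl (Or.inl hf)
      · cases j with
        | zero =>
          refine Or.inl (Or.inr ⟨?_, (PySem.Chars.startswith_iff _ _).mpr (by simpa using hp)⟩)
          have hne := pv_kw_ne w hw
          obtain ⟨wh, wt, hwl⟩ := List.exists_cons_of_ne_nil hne
          have hhead : wh = c := by
            have := (by simpa using hp : w.toList <+: c :: t)
            rw [hwl] at this
            exact (List.cons_prefix_cons.mp this).1
          have := pv_kw_bucket w hw
          rwa [hwl, hhead] at this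
        | succ j' => exact Or.inr ⟨j', by simpa using hp⟩

-- for a keyword, set lookup after the scan agrees with Python's 'in' substring test
theorem pv_contains_scan (c : String) (w : String) (hw : w ∈ pvKeywords) :
    PySem.Set.contains (pvScan c.toList PySem.Set.empty) w = PySem.Str.isIn w c := by
  rw [PySem.Str.isIn_eq]
  by_cases h : PySem.Chars.isIn w.toList c.toList = true
  · rw [h, PySem.Set.contains_iff, pv_mem_scan _ _ _ hw]
    exact Or.inr ((PySem.Chars.exists_prefix_drop_iff_isIn _ _).mpr h)
  · rw [Bool.not_eq_true] at h
    rw [h, ← Bool.not_eq_true, PySem.Set.contains_iff, pv_mem_scan _ _ _ hw]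
    rintro (hf | ⟨j, hp⟩)
    · simp [PySem.Set.empty] at hf
    · exact absurd ((PySem.Chars.exists_prefix_drop_iff_isIn _ _).mp ⟨j, hp⟩) (by simp [h])

-- ===== VERDICT (by name: the statement is the Claim_ definition above) =====
theorem infer_function_purpose_spec : Claim_equal_infer_function_purpose := by
  intro name description _
  unfold Spec_infer_function_purpose infer_function_purpose infer_function_purpose_alt
  dsimp only
  have H : ∀ w, w ∈ pvKeywords →
      PySem.Set.contains (pvScan (PySem.Str.lower (name ++ " " ++ description)).toList PySem.Set.empty) w
        = PySem.Str.isIn w (PySem.Str.lower (name ++ " " ++ description)) :=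
    pv_contains_scan _
  rw [H "signin" (by decide), H "login" (by decide), H "authenticate" (by decide), H "auth" (by decide),
    H "signup" (by decide), H "register" (by decide), H "create_user" (by decide),
    H "signout" (by decide), H "logout" (by decide), H "sign_out" (by decide),
    H "verify" (by decide), H "confirm" (by decide), H "validate_email" (by decide),
    H "submit" (by decide), H "create" (by decide), H "start" (by decide), H "scan" (by decide),
    H "get" (by decide), H "fetch" (by decide), H "retrieve" (by decide), H "result" (by decide), H "report" (by decide),
    H "check" (by decide), H "validate" (by decide), H "quota" (by decide), H "status" (by decide),
    H "generate" (by decide), H "build" (by decide),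
    H "upload" (by decide), H "store" (by decide), H "save" (by decide), H "file" (by decide), H "artifact" (by decide), H "asset" (by decide),
    H "delete" (by decide), H "remove" (by decide),
    H "schedule" (by decide), H "queue" (by decide),
    H "insert" (by decide), H "add" (by decide), H "update" (by decide), H "modify" (by decide), H "edit" (by decide), H "destroy" (by decide),
    H "find" (by decide), H "list" (by decide), H "all" (by decide), H "many" (by decide)]
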